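-- pv_equiv track=rewrite | github.com/tahatahereddine/Flowshop_TP | Flowshop_mono_obj.py | cout_CMax
-- ===== SOURCE A (Python) =====
-- def cout_CMax(solution, temps):
--
--     n = len(solution)
--     m = len(temps[0])
--     C = [[0] * m for _ in range(n)]
--     for i in range(n):
--         job = solution[i]
--         for j in range(m):
--             if i == 0 and j == 0:
--                 C[i][j] = temps[job][j]
--             elif i == 0:
--                 C[i][j] = C[i][j-1] + temps[job][j]
--             elif j == 0:
--                 C[i][j] = C[i-1][j] + temps[job][j]
--             else:
--                 C[i][j] = max(C[i-1][j], C[i][j-1]) + temps[job][j]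
--
--     return C[-1][-1]
-- ===== SOURCE B (Python) =====
-- def cout_CMax(solution, temps):
--     # Max-plus prefix reformulation: on each machine j the recurrence
--     # C[i][j] = max(C[i-1][j], C[i][j-1]) + t unrolls to
--     # C[i][j] = S[i] + max_{k<=i} (C[k][j-1] - S[k-1]),
--     # where S is the prefix sum of column j over the job sequence.
--     # So per machine we take column prefix sums and one running maximum.
--     m = len(temps[0])
--     r = []
--     acc = 0
--     for job in solution:
--         acc += temps[job][0]
--         r.append(acc)
--     for j in range(1, m):
--         s = []
--         acc = 0
--         for job in solution:
--             acc += temps[job][j]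
--             s.append(acc)
--         best = r[0]
--         r[0] = s[0] + best
--         for i in range(1, len(solution)):
--             best = max(best, r[i] - s[i - 1])
--             r[i] = s[i] + best
--     return r[-1]
-- ===== Notes on version B (the rewrite author's own statement) =====
-- stated objective: alternative
-- what changed: B replaces the grid DP recurrence C[i][j]=max(C[i-1][j],C[i][j-1])+t by a max-plus prefix reformulation: per machine it takes prefix sums S of the column and computes completion times as S[i] plus a single running maximum of (previous completion minus prefix), eliminating the completion-time matrix and the four-way boundary case analysis.
import Mathlib
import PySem

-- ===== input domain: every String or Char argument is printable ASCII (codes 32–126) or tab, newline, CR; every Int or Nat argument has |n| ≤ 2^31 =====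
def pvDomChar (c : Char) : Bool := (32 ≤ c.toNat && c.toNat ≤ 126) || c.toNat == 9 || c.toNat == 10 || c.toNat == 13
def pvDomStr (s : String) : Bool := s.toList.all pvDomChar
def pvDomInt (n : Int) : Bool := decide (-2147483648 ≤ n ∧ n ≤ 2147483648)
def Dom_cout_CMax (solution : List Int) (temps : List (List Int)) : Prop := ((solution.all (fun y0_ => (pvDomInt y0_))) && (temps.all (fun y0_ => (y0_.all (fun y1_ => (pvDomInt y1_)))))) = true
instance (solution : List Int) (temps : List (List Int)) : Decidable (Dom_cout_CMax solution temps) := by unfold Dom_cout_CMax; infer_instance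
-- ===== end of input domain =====

-- B replaces A's matrix DP recurrence by a max-plus prefix reformulation per machine
-- (column prefix sums + one running maximum over previous completions); objective: alternative.
-- Equality is proved on Pre_ (the inputs where the Python A returns normally).


-- ===== PORT A =====
-- row-major DP over a full n×m matrix C, four boundary branches; C[-1][-1] at the end
def cout_CMax (solution : List Int) (temps : List (List Int)) : Int :=
  let n := solution.length
  let m := (PySem.List.pyGetD temps 0 []).length
  let C0 : List (List Int) := List.replicate n (List.replicate m 0)
  let C := (List.range n).foldl (fun C (i : Nat) =>
    let job := PySem.List.pyGetD solution (i : Int) 0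
    (List.range m).foldl (fun C (j : Nat) =>
      let t := (PySem.List.pyGetD temps job []).getD j 0
      let v : Int :=
        if i = 0 ∧ j = 0 then t
        else if i = 0 then ((C.getD i []).getD (j-1) 0) + t
        else if j = 0 then ((C.getD (i-1) []).getD j 0) + t
        else max ((C.getD (i-1) []).getD j 0) ((C.getD i []).getD (j-1) 0) + t
      C.set i ((C.getD i []).set j v)) C) C0
  (PySem.List.pyGetD (PySem.List.pyGetD C (-1) []) (-1) 0)

-- ===== PORT B =====
-- max-plus prefix reformulation: per machine j, prefix sums of column j plus one running max
def pvPrefixCol (solution : List Int) (temps : List (List Int)) (j : Nat) : List Int :=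
  (solution.foldl (fun (p : List Int × Int) job =>
     let acc := p.2 + (PySem.List.pyGetD temps job []).getD j 0
     (p.1 ++ [acc], acc)) ([], 0)).1

def cout_CMax_alt (solution : List Int) (temps : List (List Int)) : Int :=
  let m := (PySem.List.pyGetD temps 0 []).length
  let r := pvPrefixCol solution temps 0
  let r := (List.range' 1 (m-1)).foldl (fun r j =>
      let s := pvPrefixCol solution temps j
      let best := r.getD 0 0
      let r := r.set 0 (s.getD 0 0 + best)
      ((List.range' 1 (solution.length - 1)).foldl (fun (p : List Int × Int) i =>
         let best := max p.2 (p.1.getD i 0 - s.getD (i-1) 0)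
         (p.1.set i (s.getD i 0 + best), best)) (r, best)).1) r
  PySem.List.pyGetD r (-1) 0

-- ===== PRECONDITION & SPEC =====
-- Pre_ is exactly where the Python A returns normally: a nonempty job sequence, at least one
-- machine (temps[0] nonempty), every job a valid (possibly negative) index into temps, and
-- each selected row at least as long as temps[0].
def Pre_cout_CMax (solution : List Int) (temps : List (List Int)) : Prop :=
  solution ≠ [] ∧ temps ≠ [] ∧ 1 ≤ (PySem.List.pyGetD temps 0 []).length ∧
  ∀ job ∈ solution, PySem.Raise.InRange temps.length job ∧
    (PySem.List.pyGetD temps 0 []).length ≤ (PySem.List.pyGetD temps job []).length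
instance (solution : List Int) (temps : List (List Int)) : Decidable (Pre_cout_CMax solution temps) := by
  unfold Pre_cout_CMax; infer_instance
def pvWitness_cout_CMax : List Int × List (List Int) := ([0, 1], [[2, 1], [3, 4]])

def Spec_cout_CMax (solution : List Int) (temps : List (List Int)) (out : Int) : Prop := out = cout_CMax_alt solution temps
instance (solution : List Int) (temps : List (List Int)) (out : Int) : Decidable (Spec_cout_CMax solution temps out) := by unfold Spec_cout_CMax; infer_instance

-- ===== CLAIM (what is proved, stated in full; the proofs are below) =====
def Claim_equal_cout_CMax : Prop := ∀ (solution : List Int) (temps : List (List Int)), Dom_cout_CMax solution temps → Pre_cout_CMax solution temps → Spec_cout_CMax solution temps (cout_CMax solution temps)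

-- ===== LEMMAS AND PROOFS =====

-- the completion-time recurrence A computes
def Cspec (t : Nat → Nat → Int) : Nat → Nat → Int
  | 0, 0 => t 0 0
  | 0, j+1 => Cspec t 0 j + t 0 (j+1)
  | i+1, 0 => Cspec t i 0 + t (i+1) 0
  | i+1, j+1 => max (Cspec t i (j+1)) (Cspec t (i+1) j) + t (i+1) (j+1)
termination_by i j => (i, j)

-- prefix sums of column j over the scheduled jobs
def Scol (t : Nat → Nat → Int) (j : Nat) : Nat → Int
  | 0 => t 0 j
  | i+1 => Scol t j i + t (i+1) j

-- the running maximum B maintains on machine j (j ≥ 1)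
def Bst (t : Nat → Nat → Int) (j : Nat) : Nat → Int
  | 0 => Cspec t 0 (j-1)
  | i+1 => max (Bst t j i) (Cspec t (i+1) (j-1) - Scol t j i)

def tfun (solution : List Int) (temps : List (List Int)) (i j : Nat) : Int :=
  (PySem.List.pyGetD temps (solution.getD i 0) []).getD j 0

theorem pv_set_append_len {α : Type} (P R : List α) (x v : α) :
    (P ++ x :: R).set P.length v = P ++ v :: R := by
  induction P with
  | nil => rfl
  | cons a P ih => simp [ih]

theorem pv_getD_append_len {α : Type} [Inhabited α] (P R : List α) (x d : α) :
    (P ++ x :: R).getD P.length d = x := by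
  simp [List.getD_eq_getElem?_getD]

theorem pv_set_append_at {α : Type} (P R : List α) (x v : α) (i : Nat) (h : P.length = i) :
    (P ++ x :: R).set i v = P ++ v :: R := by
  subst h; exact pv_set_append_len P R x v

theorem pv_getD_append_at {α : Type} [Inhabited α] (P R : List α) (x d : α) (i : Nat) (h : P.length = i) :
    (P ++ x :: R).getD i d = x := by
  subst h; exact pv_getD_append_len P R x d

theorem pv_foldA_inner (t : Nat → Nat → Int) (m i : Nat) (P R : List (List Int))
    (hP : P.length = i)
    (hprev : 0 < i → P.getD (i-1) [] = (List.range m).map (Cspec t (i-1))) :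
    ∀ j ≤ m,
      (List.range j).foldl (fun C j =>
          let v : Int :=
            if i = 0 ∧ j = 0 then t i j
            else if i = 0 then ((C.getD i []).getD (j-1) 0) + t i j
            else if j = 0 then ((C.getD (i-1) []).getD j 0) + t i j
            else max ((C.getD (i-1) []).getD j 0) ((C.getD i []).getD (j-1) 0) + t i j
          C.set i ((C.getD i []).set j v))
        (P ++ (List.replicate m 0) :: R)
      = P ++ ((List.range j).map (Cspec t i) ++ List.replicate (m-j) 0) :: R := by
  intro j
  induction j with
  | zero => simp
  | succ j ih =>
    intro hj
    have hjm : j < m := hj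
    rw [List.range_succ, List.foldl_append, ih (Nat.le_of_lt hjm), List.foldl_cons, List.foldl_nil]
    set row : List Int := (List.range j).map (Cspec t i) ++ List.replicate (m-j) 0 with hrowdef
    set M : List (List Int) := P ++ row :: R with hMdef
    have hrow : ∀ d, M.getD i d = row := by
      intro d; rw [hMdef]; exact pv_getD_append_at P R _ d i hP
    have hleft : 0 < j → row.getD (j-1) 0 = Cspec t i (j-1) := by
      intro hj0
      have h1 : j - 1 < ((List.range j).map (Cspec t i)).length := by simp; omega
      rw [hrowdef, List.getD_append _ _ _ _ h1, PySem.List.getD_map_range _ _ _ _ (by omega)]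
    have hup : 0 < i → (M.getD (i-1) []).getD j 0 = Cspec t (i-1) j := by
      intro hi0
      have h1 : i - 1 < P.length := by omega
      rw [hMdef, List.getD_append _ _ _ _ h1, hprev hi0, PySem.List.getD_map_range _ _ _ _ hjm]
    show M.set i ((M.getD i []).set j _) = _
    rw [hrow]
    have hv : (if i = 0 ∧ j = 0 then t i j
        else if i = 0 then (row.getD (j-1) 0) + t i j
        else if j = 0 then ((M.getD (i-1) []).getD j 0) + t i j
        else max ((M.getD (i-1) []).getD j 0) (row.getD (j-1) 0) + t i j)
        = Cspec t i j := by
      by_cases hi : i = 0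
      · by_cases hj0 : j = 0
        · subst hi; subst hj0; simp [Cspec]
        · obtain ⟨j', rfl⟩ : ∃ j', j = j'+1 := ⟨j-1, by omega⟩
          subst hi
          rw [if_neg (by simp), if_pos rfl, hleft (by omega)]
          simp [Cspec]
      · by_cases hj0 : j = 0
        · obtain ⟨i', rfl⟩ : ∃ i', i = i'+1 := ⟨i-1, by omega⟩
          subst hj0
          rw [if_neg (by simp), if_neg (by simp), if_pos rfl, hup (by omega)]
          simp [Cspec]
        · obtain ⟨i', rfl⟩ : ∃ i', i = i'+1 := ⟨i-1, by omega⟩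
          obtain ⟨j', rfl⟩ : ∃ j', j = j'+1 := ⟨j-1, by omega⟩
          rw [if_neg (by simp), if_neg (by simp), if_neg (by simp), hup (by omega), hleft (by omega)]
          simp [Cspec, max_comm]
    rw [hv]
    have hsetrow : row.set j (Cspec t i j) = (List.range (j+1)).map (Cspec t i) ++ List.replicate (m-(j+1)) 0 := by
      rw [hrowdef]
      have h1 : List.replicate (m-j) (0:Int) = 0 :: List.replicate (m-(j+1)) 0 := by
        have h2 : m - j = (m-(j+1)) + 1 := by omega
        rw [h2, List.replicate_succ]
      rw [h1]
      have hlen : ((List.range j).map (Cspec t i)).length = j := by simp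
      rw [pv_set_append_at _ _ _ _ j hlen, List.range_succ, List.map_append]
      simp
    rw [hsetrow, hMdef, pv_set_append_at _ _ _ _ i hP]
    simp [List.range_succ]

theorem pv_foldA (t : Nat → Nat → Int) (n m : Nat) :
    ∀ k ≤ n,
      (List.range k).foldl (fun C i =>
          (List.range m).foldl (fun C (j : Nat) =>
            C.set i ((C.getD i []).set j
              (if i = 0 ∧ j = 0 then t i j
              else if i = 0 then ((C.getD i []).getD (j-1) 0) + t i j
              else if j = 0 then ((C.getD (i-1) []).getD j 0) + t i j
              else max ((C.getD (i-1) []).getD j 0) ((C.getD i []).getD (j-1) 0) + t i j))) C)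
        (List.replicate n (List.replicate m 0))
      = (List.range k).map (fun i => (List.range m).map (Cspec t i))
          ++ List.replicate (n-k) (List.replicate m 0) := by
  intro k
  induction k with
  | zero => simp
  | succ k ih =>
    intro hk
    have hkn : k < n := hk
    rw [List.range_succ, List.foldl_append, ih (Nat.le_of_lt hkn), List.foldl_cons, List.foldl_nil]
    have hrepl : List.replicate (n-k) (List.replicate m (0:Int)) =
        List.replicate m 0 :: List.replicate (n-(k+1)) (List.replicate m 0) := by
      have h2 : n - k = (n-(k+1)) + 1 := by omega
      rw [h2, List.replicate_succ]
    rw [hrepl]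
    set P : List (List Int) := (List.range k).map (fun i => (List.range m).map (Cspec t i)) with hPdef
    have hP : P.length = k := by simp [hPdef]
    have hprev : 0 < k → P.getD (k-1) [] = (List.range m).map (Cspec t (k-1)) := by
      intro h
      rw [hPdef, PySem.List.getD_map_range _ _ _ _ (by omega)]
    rw [pv_foldA_inner t m k P (List.replicate (n-(k+1)) (List.replicate m 0)) hP hprev m le_rfl]
    simp
    exact hPdef

-- ---- B side ----

def pvScan (f : Int → Int) (a : Int) : List Int → List Int
  | [] => []
  | x :: xs => (a + f x) :: pvScan f (a + f x) xs

theorem pv_fold_scan (f : Int → Int) :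
    ∀ (xs : List Int) (P : List Int) (a : Int),
      xs.foldl (fun (p : List Int × Int) job => (p.1 ++ [p.2 + f job], p.2 + f job)) (P, a)
      = (P ++ pvScan f a xs, (pvScan f a xs).getLastD a) := by
  intro xs
  induction xs with
  | nil => intro P a; simp [pvScan]
  | cons x xs ih =>
    intro P a
    rw [List.foldl_cons, ih]
    simp only [pvScan, List.cons_append, List.append_assoc]
    refine Prod.ext ?_ ?_
    · simp
    · simp only []
      exact List.getLastD_cons.symm

theorem pv_scan_map (f : Int → Int) :
    ∀ (xs : List Int) (a : Int),
      pvScan f a xs = (List.range xs.length).map (fun i => a + ((xs.take (i+1)).map f).sum) := by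
  intro xs
  induction xs with
  | nil => intro a; simp [pvScan]
  | cons x xs ih =>
    intro a
    rw [pvScan, ih]
    simp only [List.length_cons, List.range_succ_eq_map, List.map_cons, List.map_map]
    refine List.cons_eq_cons.mpr ⟨by simp, ?_⟩
    apply List.map_congr_left
    intro i _
    simp [Function.comp, List.take_succ_cons]
    ring

theorem pv_sum_take (solution : List Int) (temps : List (List Int)) (j : Nat) :
    ∀ i < solution.length,
      ((solution.take (i+1)).map (fun job => (PySem.List.pyGetD temps job []).getD j 0)).sum
      = Scol (tfun solution temps) j i := by
  intro i
  induction i with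
  | zero =>
    intro h
    obtain ⟨x, xs, rfl⟩ : ∃ x xs, solution = x :: xs := by
      cases solution with
      | nil => simp at h
      | cons x xs => exact ⟨x, xs, rfl⟩
    simp [Scol, tfun]
  | succ i ih =>
    intro h
    have h1 : solution.take (i+2) = solution.take (i+1) ++ [solution[i+1]] := by
      rw [List.take_add_one, List.getElem?_eq_getElem (by omega)]
      rfl
    rw [h1, List.map_append, List.sum_append, ih (by omega)]
    simp only [Scol, tfun, List.getD, List.map_cons, List.map_nil, List.sum_cons, List.sum_nil]
    rw [List.getElem?_eq_getElem (show i+1 < solution.length by omega)]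
    simp

theorem pv_prefixCol_eq (solution : List Int) (temps : List (List Int)) (j : Nat) :
    pvPrefixCol solution temps j
      = (List.range solution.length).map (Scol (tfun solution temps) j) := by
  unfold pvPrefixCol
  rw [pv_fold_scan, pv_scan_map]
  simp only [List.nil_append]
  apply List.map_congr_left
  intro i hi
  rw [List.mem_range] at hi
  rw [pv_sum_take solution temps j i hi]
  ring

theorem pv_Scol_zero (t : Nat → Nat → Int) : ∀ i, Scol t 0 i = Cspec t i 0 := by
  intro i
  induction i with
  | zero => simp [Scol, Cspec]
  | succ i ih => simp [Scol, Cspec, ih]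

theorem pv_cspec_decomp (t : Nat → Nat → Int) (j' : Nat) :
    ∀ i, Cspec t i (j'+1) = Scol t (j'+1) i + Bst t (j'+1) i := by
  intro i
  induction i with
  | zero => simp [Cspec, Scol, Bst]; ring
  | succ i ih =>
    have h1 : Cspec t (i+1) (j'+1) = max (Cspec t i (j'+1)) (Cspec t (i+1) j') + t (i+1) (j'+1) := by
      simp [Cspec]
    have h2 : Bst t (j'+1) (i+1) = max (Bst t (j'+1) i) (Cspec t (i+1) j' - Scol t (j'+1) i) := by
      simp [Bst]
    have h3 : Scol t (j'+1) (i+1) = Scol t (j'+1) i + t (i+1) (j'+1) := by simp [Scol]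
    rw [h1, h2, h3, ih]
    omega

-- the per-machine step of B, with the prefix column already in closed form
def stepT (t : Nat → Nat → Int) (n : Nat) (j : Nat) (r : List Int) : List Int :=
  let s := (List.range n).map (Scol t j)
  let best := r.getD 0 0
  let r := r.set 0 (s.getD 0 0 + best)
  ((List.range' 1 (n - 1)).foldl (fun (p : List Int × Int) i =>
     let best := max p.2 (p.1.getD i 0 - s.getD (i-1) 0)
     (p.1.set i (s.getD i 0 + best), best)) (r, best)).1

theorem pv_inner (t : Nat → Nat → Int) (n : Nat) (hn : 1 ≤ n) (j' : Nat) :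
    ∀ k, k + 1 ≤ n →
      (List.range' 1 k).foldl (fun (p : List Int × Int) i =>
         let best := max p.2 (p.1.getD i 0 - ((List.range n).map (Scol t (j'+1))).getD (i-1) 0)
         (p.1.set i (((List.range n).map (Scol t (j'+1))).getD i 0 + best), best))
        ((List.range 1).map (fun i => Cspec t i (j'+1))
           ++ ((List.range n).map (fun i => Cspec t i j')).drop 1,
         Bst t (j'+1) 0)
      = ((List.range (k+1)).map (fun i => Cspec t i (j'+1))
           ++ ((List.range n).map (fun i => Cspec t i j')).drop (k+1),
         Bst t (j'+1) k) := by
  intro k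
  induction k with
  | zero => intro _; simp
  | succ k ih =>
    intro hk
    have hkn : k + 1 < n := by omega
    rw [List.range'_1_concat, List.foldl_append, ih (by omega), List.foldl_cons, List.foldl_nil]
    set rold : List Int := (List.range n).map (fun i => Cspec t i j') with hrold
    set P : List Int := (List.range (k+1)).map (fun i => Cspec t i (j'+1)) with hPdef
    have hP : P.length = k + 1 := by simp [hPdef]
    have hrl : rold.length = n := by simp [hrold]
    have hdrop : rold.drop (k+1) = rold.getD (k+1) 0 :: rold.drop (k+2) := by
      rw [List.getD_eq_getElem _ _ (by omega)]
      exact List.drop_eq_getElem_cons (by omega)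
    have hget : (P ++ rold.drop (k+1)).getD (1+k) 0 = rold.getD (k+1) 0 := by
      rw [hdrop]
      exact pv_getD_append_at _ _ _ _ _ (by omega)
    have hro : rold.getD (k+1) 0 = Cspec t (k+1) j' := by
      rw [hrold, PySem.List.getD_map_range _ _ _ _ hkn]
    have hs1 : ((List.range n).map (Scol t (j'+1))).getD (1+k-1) 0 = Scol t (j'+1) k := by
      have : 1 + k - 1 = k := by omega
      rw [this, PySem.List.getD_map_range _ _ _ _ (by omega)]
    have hs2 : ((List.range n).map (Scol t (j'+1))).getD (1+k) 0 = Scol t (j'+1) (k+1) := by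
      have : 1 + k = k + 1 := by omega
      rw [this, PySem.List.getD_map_range _ _ _ _ hkn]
    simp only [hget, hro, hs1, hs2]
    have hbest : max (Bst t (j'+1) k) (Cspec t (k+1) j' - Scol t (j'+1) k) = Bst t (j'+1) (k+1) := by
      simp [Bst]
    rw [hbest]
    have hval : Scol t (j'+1) (k+1) + Bst t (j'+1) (k+1) = Cspec t (k+1) (j'+1) :=
      (pv_cspec_decomp t j' (k+1)).symm
    rw [hval]
    have hset : (P ++ rold.drop (k+1)).set (1+k) (Cspec t (k+1) (j'+1))
        = (List.range (k+2)).map (fun i => Cspec t i (j'+1)) ++ rold.drop (k+2) := by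
      rw [hdrop, pv_set_append_at _ _ _ _ _ (by omega), hPdef, List.range_succ (n := k+1),
          List.map_append]
      simp
    rw [hset]

theorem pv_step (t : Nat → Nat → Int) (n : Nat) (hn : 1 ≤ n) (j' : Nat) :
    stepT t n (j'+1) ((List.range n).map (fun i => Cspec t i j'))
      = (List.range n).map (fun i => Cspec t i (j'+1)) := by
  unfold stepT
  have hget0 : ((List.range n).map (fun i => Cspec t i j')).getD 0 0 = Cspec t 0 j' := by
    rw [PySem.List.getD_map_range _ _ _ _ (by omega)]
  have hs0 : ((List.range n).map (Scol t (j'+1))).getD 0 0 = Scol t (j'+1) 0 := by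
    rw [PySem.List.getD_map_range _ _ _ _ (by omega)]
  simp only [hget0, hs0]
  have hv0 : Scol t (j'+1) 0 + Cspec t 0 j' = Cspec t 0 (j'+1) := by
    have h := pv_cspec_decomp t j' 0
    simp only [Bst, Nat.add_sub_cancel] at h
    omega
  have hB0 : Cspec t 0 j' = Bst t (j'+1) 0 := by simp [Bst]
  have hset0 : ((List.range n).map (fun i => Cspec t i j')).set 0 (Cspec t 0 (j'+1))
      = (List.range 1).map (fun i => Cspec t i (j'+1))
          ++ ((List.range n).map (fun i => Cspec t i j')).drop 1 := by
    obtain ⟨n', rfl⟩ : ∃ n', n = n'+1 := ⟨n-1, by omega⟩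
    rw [List.range_succ_eq_map]
    simp
  rw [hv0, hB0, hset0, pv_inner t n hn j' (n-1) (by omega)]
  have h1 : n - 1 + 1 = n := by omega
  rw [h1]
  simp

theorem pv_outer (t : Nat → Nat → Int) (n : Nat) (hn : 1 ≤ n) :
    ∀ (k s : Nat), 1 ≤ s →
      (List.range' s k).foldl (fun r j => stepT t n j r)
        ((List.range n).map (fun i => Cspec t i (s-1)))
      = (List.range n).map (fun i => Cspec t i (s-1+k)) := by
  intro k
  induction k with
  | zero => intro s _; simp
  | succ k ih =>
    intro s hs
    rw [List.range'_succ, List.foldl_cons]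
    obtain ⟨s', rfl⟩ : ∃ s', s = s'+1 := ⟨s-1, by omega⟩
    have h1 : s' + 1 - 1 = s' := by omega
    rw [h1, pv_step t n hn s']
    have h3 := ih (s'+2) (by omega)
    have h4 : s'+2-1 = s'+1 := rfl
    rw [h4] at h3
    have h6 : s' + (k+1) = s'+1+k := by omega
    rw [h6]
    exact h3

-- final extraction lemmas
theorem pv_lastA (t : Nat → Nat → Int) (n m : Nat) (hn : 1 ≤ n) (hm : 1 ≤ m) :
    PySem.List.pyGetD (PySem.List.pyGetD
        ((List.range n).map (fun i => (List.range m).map (Cspec t i))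
          ++ List.replicate (n-n) (List.replicate m 0)) (-1) []) (-1) 0
      = Cspec t (n-1) (m-1) := by
  rw [Nat.sub_self, List.replicate_zero, List.append_nil]
  have h1 : ((List.range n).map (fun i => (List.range m).map (Cspec t i))) ≠ [] := by
    simp; omega
  rw [PySem.List.pyGetD_neg_one _ _ h1, List.getLast_eq_getElem]
  simp only [List.length_map, List.length_range, List.getElem_map, List.getElem_range]
  have h2 : ((List.range m).map (Cspec t (n-1))) ≠ [] := by simp; omega
  rw [PySem.List.pyGetD_neg_one _ _ h2, List.getLast_eq_getElem]
  simp

theorem pv_lastB (t : Nat → Nat → Int) (n m : Nat) (hn : 1 ≤ n) :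
    PySem.List.pyGetD ((List.range n).map (fun i => Cspec t i m)) (-1) 0
      = Cspec t (n-1) m := by
  have h1 : ((List.range n).map (fun i => Cspec t i m)) ≠ [] := by simp; omega
  rw [PySem.List.pyGetD_neg_one _ _ h1, List.getLast_eq_getElem]
  simp

theorem pv_altB (t : Nat → Nat → Int) (n m : Nat) (hn : 1 ≤ n) :
    PySem.List.pyGetD ((List.range' 1 (m-1)).foldl (fun r j => stepT t n j r)
        ((List.range n).map (Scol t 0))) (-1) 0
      = Cspec t (n-1) (m-1) := by
  have hinit : (List.range n).map (Scol t 0) = (List.range n).map (fun i => Cspec t i (1-1)) := by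
    apply List.map_congr_left
    intro i _
    simpa using pv_Scol_zero t i
  rw [hinit, pv_outer t n hn (m-1) 1 (by omega)]
  have h1 : 1-1+(m-1) = m-1 := by omega
  rw [h1]
  exact pv_lastB t n (m-1) hn

theorem pv_ports_eq (solution : List Int) (temps : List (List Int))
    (hn : solution ≠ []) (hm : 1 ≤ (PySem.List.pyGetD temps 0 []).length) :
    cout_CMax solution temps = cout_CMax_alt solution temps := by
  have hn1 : 1 ≤ solution.length := by
    cases solution with
    | nil => exact absurd rfl hn
    | cons x xs => simp
  rw [PySem.List.pyGetD_zero] at hm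
  unfold cout_CMax cout_CMax_alt
  simp only [PySem.List.pyGetD_natCast, PySem.List.pyGetD_zero, pv_prefixCol_eq]
  rw [pv_foldA (fun i j => (PySem.List.pyGetD temps (solution.getD i 0) []).getD j 0)
        solution.length ((temps.getD 0 []).length) solution.length le_rfl,
      pv_lastA _ _ _ hn1 hm]
  exact (pv_altB (fun i j => (PySem.List.pyGetD temps (solution.getD i 0) []).getD j 0)
    solution.length ((temps.getD 0 []).length) hn1).symm

-- ===== VERDICT (by name: the statement is the Claim_ definition above) =====
theorem cout_CMax_spec : Claim_equal_cout_CMax := by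
  intro solution temps _ hpre
  unfold Spec_cout_CMax
  exact pv_ports_eq solution temps hpre.1 hpre.2.2.1
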